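-- pv_equiv track=rewrite | github.com/seanchen513/dcp | dcp189 - given array, return length of longest subarray where all its elements are distinct.py | maximal_subarrays
-- ===== SOURCE A (Python) =====
-- def maximal_subarrays(arr):
--     n = len(arr)
--     s = set() # to keep track of distinct elements
--
--     end = 0 # end of subarray (sliding window)
--     subarrays = []
--
--     for start in range(0, n):
--         while ((end < n) and (arr[end] not in s)):
--             s.add(arr[end])
--             end += 1
--
--         subarrays.append(arr[start:end])
--
--         # remove first/left element of subarray before "start" is incremented
--         s.remove(arr[start])
--
--     return subarrays
-- ===== SOURCE B (Python) =====
-- def maximal_subarrays(arr):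
--     # For each start, build its maximal distinct window independently:
--     # greedily take elements of the suffix until a repeat appears.
--     n = len(arr)
--
--     def block(start):
--         out = []
--         seen = set()
--         for j in range(start, n):
--             x = arr[j]
--             if x in seen:
--                 break
--             seen.add(x)
--             out.append(x)
--         return out
--
--     return [block(i) for i in range(n)]
-- ===== Notes on version B (the rewrite author's own statement) =====
-- stated objective: simpler
-- what changed: Replaced the shared sliding-window state (one set plus a persistent end pointer carried across starts, with element removal) by an independent greedy scan per start that collects the distinct prefix of each suffix directly, with no shared mutable state.
import Mathlib
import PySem

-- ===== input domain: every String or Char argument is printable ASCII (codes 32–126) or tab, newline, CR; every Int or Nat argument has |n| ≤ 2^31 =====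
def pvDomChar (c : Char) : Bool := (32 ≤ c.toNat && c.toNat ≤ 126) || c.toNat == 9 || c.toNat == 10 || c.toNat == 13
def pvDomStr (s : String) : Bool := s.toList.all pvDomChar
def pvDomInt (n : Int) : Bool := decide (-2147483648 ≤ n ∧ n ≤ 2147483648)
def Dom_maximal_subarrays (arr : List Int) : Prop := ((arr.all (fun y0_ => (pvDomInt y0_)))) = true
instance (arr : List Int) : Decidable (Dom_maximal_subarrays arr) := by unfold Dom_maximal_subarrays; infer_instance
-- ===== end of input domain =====

-- B replaces A's shared sliding-window state (set + persistent end pointer, element removal per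
-- start) by an independent greedy distinct-prefix scan per start; objective: simpler, not faster.

-- ===== PORT A =====
-- the inner 'while ((end < n) and (arr[end] not in s)): s.add(arr[end]); end += 1' loop
def msWhile (arr : List Int) (s : PySem.Set Int) (e : Nat) : PySem.Set Int × Nat :=
  if h : e < arr.length ∧ arr.getD e 0 ∉ s then
    msWhile arr (PySem.Set.add s (arr.getD e 0)) (e + 1)
  else (s, e)
  termination_by arr.length - e
  decreasing_by omega

def maximal_subarrays (arr : List Int) : List (List Int) :=
  let n := arr.length
  ((List.range n).foldl
    (fun (st : PySem.Set Int × Nat × List (List Int)) start =>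
      let se := msWhile arr st.1 st.2.1
      -- s.remove(arr[start]): arr[start] is always in s here (end > start after the while
      -- loop), so Python's remove never raises and equals discard exactly
      (PySem.Set.discard se.1 (arr.getD start 0), se.2,
        st.2.2 ++ [PySem.List.slice arr (some (start : Int)) (some (se.2 : Int))]))
    (PySem.Set.empty, 0, [])).2.2

-- ===== PORT B =====
-- the 'for j in range(start, n): x = arr[j]; if x in seen: break; seen.add(x); out.append(x)'
-- loop of block()
def msBlockP (arr : List Int) (out : List Int) (seen : PySem.Set Int) (j : Nat) : List Int :=
  if j < arr.length then
    if arr.getD j 0 ∈ seen then out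
    else msBlockP arr (out ++ [arr.getD j 0]) (PySem.Set.add seen (arr.getD j 0)) (j + 1)
  else out
  termination_by arr.length - j
  decreasing_by omega

def maximal_subarrays_alt (arr : List Int) : List (List Int) :=
  (List.range arr.length).map (fun (i : Nat) => msBlockP arr [] PySem.Set.empty i)

-- ===== PRECONDITION & SPEC =====
def Spec_maximal_subarrays (arr : List Int) (out : List (List Int)) : Prop := out = maximal_subarrays_alt arr
instance (arr : List Int) (out : List (List Int)) : Decidable (Spec_maximal_subarrays arr out) := by unfold Spec_maximal_subarrays; infer_instance

-- ===== CLAIM (what is proved, stated in full; the proofs are below) =====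
def Claim_equal_maximal_subarrays : Prop := ∀ (arr : List Int), Dom_maximal_subarrays arr → Spec_maximal_subarrays arr (maximal_subarrays arr)

-- ===== LEMMAS AND PROOFS =====

-- proof-side view of B's inner loop: 'out' and 'seen' always hold the same elements,
-- so the loop is equivalent to one with a single accumulator
def msBlock (acc : List Int) : List Int → List Int
  | [] => acc
  | x :: xs => if x ∈ acc then acc else msBlock (acc ++ [x]) xs

lemma msBlockP_eq (arr : List Int) (j : Nat) (out : List Int) :
    msBlockP arr out out j = msBlock out (arr.drop j) := by
  by_cases h : j < arr.length
  · have hdrop : arr.drop j = arr[j] :: arr.drop (j + 1) := List.drop_eq_getElem_cons h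
    have hgetD : arr.getD j 0 = arr[j] := List.getD_eq_getElem arr 0 h
    by_cases hx : arr[j] ∈ out
    · rw [msBlockP, if_pos h, hgetD, if_pos hx, hdrop]
      simp [msBlock, hx]
    · rw [msBlockP, if_pos h, hgetD, if_neg hx, PySem.Set.add_of_not_mem hx,
        msBlockP_eq arr (j + 1) (out ++ [arr[j]]), hdrop]
      simp [msBlock, hx]
  · rw [msBlockP, if_neg h, List.drop_eq_nil_of_le (Nat.le_of_not_lt h)]
    rfl
termination_by arr.length - j
decreasing_by omega

-- msBlock extends its accumulator with a take of the input
lemma msBlock_take (l acc : List Int) : ∃ k, k ≤ l.length ∧ msBlock acc l = acc ++ l.take k := by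
  induction l generalizing acc with
  | nil => exact ⟨0, by simp [msBlock]⟩
  | cons x xs ih =>
    by_cases hx : x ∈ acc
    · exact ⟨0, by simp [msBlock, hx]⟩
    · obtain ⟨k, hk, he⟩ := ih (acc ++ [x])
      exact ⟨k + 1, by simpa using hk, by simp [msBlock, hx, he]⟩

lemma msBlock_nodup (l acc : List Int) (h : acc.Nodup) : (msBlock acc l).Nodup := by
  induction l generalizing acc with
  | nil => simpa [msBlock]
  | cons x xs ih =>
    by_cases hx : x ∈ acc
    · simpa [msBlock, hx]
    · simp only [msBlock, hx, if_false]
      exact ih _ (h.append (List.nodup_singleton x)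
        (by simpa [List.disjoint_singleton] using hx))

-- a duplicate-free prefix already swallowed into the accumulator can be skipped
lemma msBlock_skip (w rest acc : List Int) (h : (acc ++ w).Nodup) :
    msBlock acc (w ++ rest) = msBlock (acc ++ w) rest := by
  induction w generalizing acc with
  | nil => simp
  | cons x xs ih =>
    have hx : x ∉ acc := fun hmem =>
      (List.nodup_append.mp h).2.2 x hmem x (by simp) rfl
    have := ih (acc ++ [x]) (by simpa using h)
    simpa [msBlock, hx, List.append_assoc] using this

lemma msBlock_length_ge (l acc : List Int) : acc.length ≤ (msBlock acc l).length := by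
  obtain ⟨k, _, he⟩ := msBlock_take l acc
  simp [he]

-- the while loop of A is msBlock on the remaining suffix
lemma msWhile_eq (arr : List Int) (e : Nat) (s : List Int) :
    msWhile arr s e
      = (msBlock s (arr.drop e), e + ((msBlock s (arr.drop e)).length - s.length)) := by
  by_cases h : e < arr.length
  · have hdrop : arr.drop e = arr[e] :: arr.drop (e + 1) := List.drop_eq_getElem_cons h
    have hgetD : arr.getD e 0 = arr[e] := List.getD_eq_getElem arr 0 h
    by_cases hmem : arr[e] ∈ s
    · rw [msWhile, dif_neg (fun hc => hc.2 (hgetD ▸ hmem)), hdrop]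
      simp [msBlock, hmem]
    · have hrec := msWhile_eq arr (e + 1) (s ++ [arr[e]])
      have hlen : (s ++ [arr[e]]).length ≤ (msBlock (s ++ [arr[e]]) (arr.drop (e + 1))).length :=
        msBlock_length_ge _ _
      rw [msWhile, dif_pos ⟨h, by rw [hgetD]; exact hmem⟩, hgetD,
        PySem.Set.add_of_not_mem hmem, hrec, hdrop]
      have hif : msBlock s (arr[e] :: arr.drop (e + 1))
          = msBlock (s ++ [arr[e]]) (arr.drop (e + 1)) := by
        simp [msBlock, hmem]
      rw [hif]
      refine Prod.ext rfl ?_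
      simp only [List.length_append, List.length_cons, List.length_nil] at hlen ⊢
      omega
  · rw [msWhile, dif_neg (fun hc => h hc.1)]
    simp [List.drop_eq_nil_of_le (Nat.le_of_not_lt h), msBlock]
termination_by arr.length - e
decreasing_by omega

-- main loop invariant for A's fold
lemma loopA (arr : List Int) :
    ∀ (cnt start e : Nat) (s : List Int) (subs : List (List Int)),
    start + cnt = arr.length → start ≤ e → e ≤ arr.length →
    s = (arr.drop start).take (e - start) → s.Nodup →
    ((List.range' start cnt).foldl
      (fun (st : PySem.Set Int × Nat × List (List Int)) i =>
        ((msWhile arr st.1 st.2.1).1.discard (arr.getD i 0), (msWhile arr st.1 st.2.1).2,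
          st.2.2 ++ [PySem.List.slice arr (some (i : Int)) (some (((msWhile arr st.1 st.2.1).2 : Nat) : Int))]))
      (s, e, subs)).2.2
      = subs ++ (List.range' start cnt).map (fun i => msBlock [] (arr.drop i)) := by
  intro cnt
  induction cnt with
  | zero => intro start e s subs _ _ _ _ _; simp
  | succ cnt ih =>
    intro start e s subs hn hse hen hs hnd
    have hstart : start < arr.length := by omega
    have hdropstart : arr.drop start = arr[start] :: arr.drop (start + 1) :=
      List.drop_eq_getElem_cons hstart
    have hsplit : arr.drop start = s ++ arr.drop e := by
      have h1 : List.drop (e - start) (List.drop start arr) = List.drop e arr := by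
        rw [List.drop_drop]; congr 1; omega
      rw [hs, ← h1]
      exact (List.take_append_drop _ _).symm
    have hslen : s.length = e - start := by
      rw [hs, List.length_take, List.length_drop]; omega
    have hB : msBlock s (arr.drop e) = msBlock [] (arr.drop start) := by
      rw [hsplit, msBlock_skip s (arr.drop e) [] (by simpa using hnd)]
      simp
    obtain ⟨k, hk, hBk⟩ := msBlock_take (arr.drop start) []
    simp only [List.nil_append] at hBk
    have hBlen : (msBlock [] (arr.drop start)).length = k := by
      rw [hBk, List.length_take, List.length_drop]
      simp only [List.length_drop] at hk
      omega
    have hBge : s.length ≤ (msBlock [] (arr.drop start)).length := by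
      rw [← hB]; exact msBlock_length_ge _ _
    have hk1 : 1 ≤ k := by
      have h1 : 1 ≤ (msBlock [] (arr.drop start)).length := by
        rw [hdropstart]
        simp only [msBlock, List.not_mem_nil, if_false, List.nil_append]
        simpa using msBlock_length_ge (arr.drop (start + 1)) [arr[start]]
      omega
    obtain ⟨j, rfl⟩ : ∃ j, k = j + 1 := ⟨k - 1, by omega⟩
    have hBnd : (msBlock [] (arr.drop start)).Nodup := msBlock_nodup _ _ (by simp)
    have hBcons : msBlock [] (arr.drop start) = arr[start] :: (arr.drop (start + 1)).take j := by
      rw [hBk, hdropstart, List.take_succ_cons]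
    have hW : msWhile arr s e = (msBlock [] (arr.drop start), start + (j + 1)) := by
      have h2 : e + ((j + 1) - (e - start)) = start + (j + 1) := by
        rw [hBlen] at hBge
        omega
      rw [msWhile_eq, hB, hBlen, hslen, h2]
    have hgetDs : arr.getD start 0 = arr[start] := List.getD_eq_getElem arr 0 hstart
    have hnotin : arr[start] ∉ (arr.drop (start + 1)).take j := by
      have := hBnd; rw [hBcons] at this
      exact (List.nodup_cons.mp this).1
    have htnd : ((arr.drop (start + 1)).take j).Nodup := by
      have := hBnd; rw [hBcons] at this
      exact (List.nodup_cons.mp this).2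
    have hdiscard : PySem.Set.discard (msBlock [] (arr.drop start)) (arr[start])
        = (arr.drop (start + 1)).take j := by
      rw [hBcons]
      simp only [PySem.Set.discard, List.filter_cons, beq_self_eq_true, Bool.not_true,
        Bool.false_eq_true, if_false]
      refine List.filter_eq_self.mpr ?_
      intro a ha
      have hne : a ≠ arr[start] := fun hEq => hnotin (hEq ▸ ha)
      simp [hne]
    have hslice : PySem.List.slice arr (some (start : Int)) (some (((start + (j + 1) : Nat)) : Int))
        = msBlock [] (arr.drop start) := by
      rw [PySem.List.slice_natCast, hBk]
      congr 1
      omega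
    have hk' : j + 1 ≤ arr.length - start := by simpa using hk
    rw [List.range'_succ]
    simp only [List.foldl_cons, List.map_cons]
    rw [hW]
    simp only [hgetDs, hdiscard, hslice]
    rw [ih (start + 1) (start + (j + 1)) ((arr.drop (start + 1)).take j)
      (subs ++ [msBlock [] (arr.drop start)])
      (by omega) (by omega) (by omega) (by congr 1; omega) htnd]
    simp

-- ===== VERDICT (by name: the statement is the Claim_ definition above) =====
theorem maximal_subarrays_spec : Claim_equal_maximal_subarrays := by
  intro arr _
  unfold Spec_maximal_subarrays
  have halt : maximal_subarrays_alt arr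
      = (List.range' 0 arr.length).map (fun i => msBlock [] (arr.drop i)) := by
    unfold maximal_subarrays_alt
    rw [List.range_eq_range']
    exact List.map_congr_left (fun i _ => msBlockP_eq arr i [])
  rw [halt]
  unfold maximal_subarrays
  dsimp only
  rw [List.range_eq_range']
  rw [loopA arr arr.length 0 0 PySem.Set.empty [] (by omega) (by omega) (by omega)
    (by simp [PySem.Set.empty]) (by simp [PySem.Set.empty])]
  simp
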